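-- pv_equiv track=rewrite | github.com/Kushagra-0801/Advent-Of-Code | 2018/Day 7-2.py | get_available_tasks
-- ===== SOURCE A (Python) =====
-- def get_parents(task, graph):
-- 	parents = []
-- 	for parent, children in graph.items():
-- 		if task in children:
-- 			parents.append(parent)
-- 	return parents
--
-- def get_available_tasks(candidates, done_tasks, graph):
-- 	# an available task has all his parents done and it isn't already visited
-- 	available = []
-- 	for task in candidates:
-- 		parents = get_parents(task, graph)
-- 		all_parents_done = all(parent in done_tasks for parent in parents)
-- 		if all_parents_done and task not in done_tasks:
-- 			available.append(task)
-- 	return available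
-- ===== SOURCE B (Python) =====
-- def get_available_tasks(candidates, done_tasks, graph):
--     # One pass over the graph: collect every child of a not-yet-done parent
--     # into a "blocked" set; a candidate is available iff it is neither done
--     # nor blocked.  O(G + C) instead of A's O(C * G).
--     done = set(done_tasks)
--     blocked = set()
--     for parent, children in graph.items():
--         if parent not in done:
--             blocked.update(children)
--     return [t for t in candidates if t not in done and t not in blocked]
-- ===== Notes on version B (the rewrite author's own statement) =====
-- stated objective: faster
-- what changed: Instead of scanning the whole graph per candidate to collect its parents, B makes a single pass over the graph building a 'blocked' set of all children of not-done parents plus a done-set, then filters candidates in one pass.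
import Mathlib
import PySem

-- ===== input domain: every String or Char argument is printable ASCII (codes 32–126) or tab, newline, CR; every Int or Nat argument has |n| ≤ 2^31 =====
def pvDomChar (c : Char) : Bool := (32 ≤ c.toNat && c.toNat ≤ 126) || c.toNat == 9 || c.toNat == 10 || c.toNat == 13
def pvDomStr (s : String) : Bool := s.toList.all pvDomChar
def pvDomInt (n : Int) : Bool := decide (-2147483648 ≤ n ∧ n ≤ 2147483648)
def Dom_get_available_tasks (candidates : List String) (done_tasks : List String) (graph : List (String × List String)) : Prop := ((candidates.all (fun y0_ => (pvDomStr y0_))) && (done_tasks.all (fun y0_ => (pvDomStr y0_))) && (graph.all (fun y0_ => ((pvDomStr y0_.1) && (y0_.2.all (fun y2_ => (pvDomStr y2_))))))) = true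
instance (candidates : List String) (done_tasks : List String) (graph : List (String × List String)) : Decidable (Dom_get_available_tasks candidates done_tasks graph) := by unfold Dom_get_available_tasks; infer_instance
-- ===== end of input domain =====

-- B makes one pass over the graph (blocked-set of children of not-done parents)
-- instead of A's per-candidate graph scan; return values are proved equal.

-- ===== PORT A =====
def get_parents (task : String) (graph : List (String × List String)) : List String :=
  graph.foldl (fun parents pc => if task ∈ pc.2 then parents ++ [pc.1] else parents) []

def get_available_tasks (candidates : List String) (done_tasks : List String) (graph : List (String × List String)) : List String :=
  candidates.foldl (fun available task =>
    let parents := get_parents task graph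
    let all_parents_done := parents.all (fun p => p ∈ done_tasks)
    if all_parents_done && !(task ∈ done_tasks : Bool) then available ++ [task] else available) []

-- ===== PORT B =====
def get_available_tasks_alt (candidates : List String) (done_tasks : List String) (graph : List (String × List String)) : List String :=
  let done : PySem.Set String := PySem.Set.ofList done_tasks
  let blocked : PySem.Set String :=
    graph.foldl (fun b pc => if PySem.Set.contains done pc.1 then b else PySem.Set.update b pc.2) PySem.Set.empty
  candidates.filter (fun t => !(PySem.Set.contains done t) && !(PySem.Set.contains blocked t))

-- ===== PRECONDITION & SPEC =====
def Spec_get_available_tasks (candidates : List String) (done_tasks : List String) (graph : List (String × List String)) (out : List String) : Prop := out = get_available_tasks_alt candidates done_tasks graph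
instance (candidates : List String) (done_tasks : List String) (graph : List (String × List String)) (out : List String) : Decidable (Spec_get_available_tasks candidates done_tasks graph out) := by unfold Spec_get_available_tasks; infer_instance

-- ===== CLAIM (what is proved, stated in full; the proofs are below) =====
def Claim_equal_get_available_tasks : Prop := ∀ (candidates : List String) (done_tasks : List String) (graph : List (String × List String)), Dom_get_available_tasks candidates done_tasks graph → Spec_get_available_tasks candidates done_tasks graph (get_available_tasks candidates done_tasks graph)

-- ===== LEMMAS AND PROOFS =====

theorem mem_get_parents (task p : String) (graph : List (String × List String)) :
    p ∈ get_parents task graph ↔ ∃ cs, (p, cs) ∈ graph ∧ task ∈ cs := by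
  unfold get_parents
  suffices h : ∀ (acc : List String) (g : List (String × List String)),
      p ∈ g.foldl (fun parents pc => if task ∈ pc.2 then parents ++ [pc.1] else parents) acc ↔
      p ∈ acc ∨ ∃ cs, (p, cs) ∈ g ∧ task ∈ cs by
    simpa using h [] graph
  intro acc g
  induction g generalizing acc with
  | nil => simp
  | cons pc g ih =>
    simp only [List.foldl_cons]
    rcases pc with ⟨q, cs⟩
    by_cases hm : task ∈ cs
    · simp only [if_pos hm, ih, List.mem_append, List.mem_cons,
        Prod.mk.injEq]
      constructor
      · rintro ((h | h) | ⟨cs', h1, h2⟩)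
        · exact .inl h
        · rcases h with h | h
          · exact .inr ⟨cs, .inl ⟨h, rfl⟩, hm⟩
          · exact absurd h (List.not_mem_nil)
        · exact .inr ⟨cs', .inr h1, h2⟩
      · rintro (h | ⟨cs', (⟨rfl, rfl⟩ | h1), h2⟩)
        · exact .inl (.inl h)
        · exact .inl (.inr (.inl rfl))
        · exact .inr ⟨cs', h1, h2⟩
    · simp only [if_neg hm, ih, List.mem_cons, Prod.mk.injEq]
      constructor
      · rintro (h | ⟨cs', h1, h2⟩)
        · exact .inl h
        · exact .inr ⟨cs', .inr h1, h2⟩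
      · rintro (h | ⟨cs', (⟨rfl, rfl⟩ | h1), h2⟩)
        · exact .inl h
        · exact absurd h2 hm
        · exact .inr ⟨cs', h1, h2⟩

theorem mem_blocked (task : String) (done : PySem.Set String) (b : PySem.Set String) (g : List (String × List String)) :
    (task ∈ g.foldl (fun b pc => if pc.1 ∈ done then b else PySem.Set.update b pc.2) b) ↔
    task ∈ b ∨ ∃ pc ∈ g, pc.1 ∉ done ∧ task ∈ pc.2 := by
  induction g generalizing b with
  | nil => simp
  | cons pc g ih =>
    simp only [List.foldl_cons]
    by_cases hc : pc.1 ∈ done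
    · rw [if_pos hc, ih]
      constructor
      · rintro (h | ⟨q, h1, h2, h3⟩)
        · exact .inl h
        · exact .inr ⟨q, List.mem_cons_of_mem _ h1, h2, h3⟩
      · rintro (h | ⟨q, h1, h2, h3⟩)
        · exact .inl h
        · rcases List.mem_cons.1 h1 with h1 | h1
          · subst h1; exact absurd hc h2
          · exact .inr ⟨q, h1, h2, h3⟩
    · rw [if_neg hc, ih]
      simp only [PySem.Set.mem_update]
      constructor
      · rintro ((h | h) | ⟨q, h1, h2, h3⟩)
        · exact .inl h
        · exact .inr ⟨pc, List.mem_cons_self .., hc, h⟩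
        · exact .inr ⟨q, List.mem_cons_of_mem _ h1, h2, h3⟩
      · rintro (h | ⟨q, h1, h2, h3⟩)
        · exact .inl (.inl h)
        · rcases List.mem_cons.1 h1 with h1 | h1
          · subst h1; exact .inl (.inr h3)
          · exact .inr ⟨q, h1, h2, h3⟩

theorem cond_eq (task : String) (done_tasks : List String) (graph : List (String × List String)) :
    (((get_parents task graph).all fun p => decide (p ∈ done_tasks)) && !decide (task ∈ done_tasks)) =
    (!PySem.Set.contains (PySem.Set.ofList done_tasks) task &&
     !PySem.Set.contains (graph.foldl (fun b pc => if PySem.Set.contains (PySem.Set.ofList done_tasks) pc.1 then b else PySem.Set.update b pc.2) PySem.Set.empty) task) := by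
  rw [Bool.eq_iff_iff]
  simp only [Bool.and_eq_true, Bool.not_eq_eq_eq_not, Bool.not_true, PySem.Set.contains,
    decide_eq_false_iff_not, List.all_eq_true, decide_eq_true_eq, List.contains_eq_mem]
  rw [mem_blocked]
  simp only [PySem.Set.empty, List.not_mem_nil, false_or, PySem.Set.mem_ofList]
  constructor
  · rintro ⟨hall, ht⟩
    refine ⟨ht, ?_⟩
    rintro ⟨pc, hpc, hnd, htc⟩
    exact hnd (hall pc.1 ((mem_get_parents task pc.1 graph).2 ⟨pc.2, hpc, htc⟩))
  · rintro ⟨ht, hb⟩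
    refine ⟨?_, ht⟩
    intro p hp
    obtain ⟨cs, hpc, htc⟩ := (mem_get_parents task p graph).1 hp
    by_contra hnd
    exact hb ⟨(p, cs), hpc, hnd, htc⟩

theorem get_available_tasks_eq (candidates done_tasks : List String) (graph : List (String × List String)) :
    get_available_tasks candidates done_tasks graph = get_available_tasks_alt candidates done_tasks graph := by
  unfold get_available_tasks get_available_tasks_alt
  rw [PySem.List.foldl_append_if_eq_filter
    (p := fun task => (get_parents task graph).all (fun p => p ∈ done_tasks) && !(task ∈ done_tasks : Bool))]
  simp only [List.nil_append]
  exact List.filter_congr (fun t _ => cond_eq t done_tasks graph)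

-- ===== VERDICT (by name: the statement is the Claim_ definition above) =====
theorem get_available_tasks_spec : Claim_equal_get_available_tasks := by
  intro candidates done_tasks graph _
  exact get_available_tasks_eq candidates done_tasks graph
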